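-- pv_equiv track=rewrite | github.com/khanhduong95/opentuxworld | scripts/switch_item.py | check_item_next
-- ===== SOURCE A (Python) =====
-- def check_item_next(own, item_number):
--     if item_number == 0 or item_number > 3:
--         return 0
--     elif item_number == 1:
--         if own["snow"] > 0:
--             return 1
--         else:
--             return check_item_next(own, 2)
--     elif item_number == 2:
--         if own["ice"] > 0:
--             return 2
--         else:
--             return 0
--     else:
--         if own["fish"] > 0:
--             return 3
--         else:
--             return 0
-- ===== SOURCE B (Python) =====
-- def check_item_next(own, item_number):
--     if item_number == 0 or item_number > 3:
--         return 0
--     checks = {1: [("snow", 1), ("ice", 2)], 2: [("ice", 2)]}.get(item_number, [("fish", 3)])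
--     for key, value in checks:
--         if own[key] > 0:
--             return value
--     return 0
-- ===== Notes on version B (the rewrite author's own statement) =====
-- stated objective: simpler
-- what changed: Replaced the recursive nested if/elif chain by a table: a dict maps the item number to its ordered list of (inventory key, result) checks (default = fish), and one loop returns the first check whose inventory count is positive.
import Mathlib
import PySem

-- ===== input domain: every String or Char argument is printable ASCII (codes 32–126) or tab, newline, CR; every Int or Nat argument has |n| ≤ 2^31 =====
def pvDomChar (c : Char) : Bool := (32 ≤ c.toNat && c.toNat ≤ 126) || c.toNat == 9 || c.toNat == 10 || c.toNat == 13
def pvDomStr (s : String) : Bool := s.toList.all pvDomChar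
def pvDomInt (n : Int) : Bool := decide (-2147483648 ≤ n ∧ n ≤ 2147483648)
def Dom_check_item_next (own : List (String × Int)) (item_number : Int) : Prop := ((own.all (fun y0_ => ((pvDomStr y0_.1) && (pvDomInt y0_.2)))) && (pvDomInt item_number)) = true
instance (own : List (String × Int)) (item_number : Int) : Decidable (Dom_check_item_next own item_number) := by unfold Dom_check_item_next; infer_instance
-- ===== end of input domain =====

-- B replaces A's recursive if/elif chain by a table mapping the item number to its ordered
-- (inventory key, result) checks, scanned once (objective: simpler). Equivalence is about the
-- return value; neither program mutates its arguments.

-- ===== PORT A =====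
-- own["k"] is ported as (Dict.mk own).getD "k" 0; Python raises KeyError on a missing key,
-- those inputs are excluded by Pre_check_item_next below.
def check_item_next (own : List (String × Int)) (item_number : Int) : Int :=
  if item_number = 0 ∨ item_number > 3 then 0
  else if item_number = 1 then
    if (PySem.Dict.mk own).getD "snow" 0 > 0 then 1
    else check_item_next own 2
  else if item_number = 2 then
    if (PySem.Dict.mk own).getD "ice" 0 > 0 then 2 else 0
  else
    if (PySem.Dict.mk own).getD "fish" 0 > 0 then 3 else 0
termination_by (if item_number = 1 then 1 else 0 : Nat)
decreasing_by simp_all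

-- ===== PORT B =====
-- the table {1: [...], 2: [...]}.get(item_number, [("fish",3)])
def pvChecks (item_number : Int) : List (String × Int) :=
  (PySem.Dict.mk [((1 : Int), [("snow", (1 : Int)), ("ice", 2)]), (2, [("ice", 2)])]).getD
    item_number [("fish", 3)]

-- the for-loop: first check whose inventory count is positive (own[key] as in port A)
def pvFirstCheck (own : List (String × Int)) : List (String × Int) → Int
  | [] => 0
  | (key, value) :: rest =>
    if (PySem.Dict.mk own).getD key 0 > 0 then value else pvFirstCheck own rest

def check_item_next_alt (own : List (String × Int)) (item_number : Int) : Int :=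
  if item_number = 0 ∨ item_number > 3 then 0
  else pvFirstCheck own (pvChecks item_number)

-- ===== PRECONDITION & SPEC =====
-- Pre_ excludes exactly the inputs on which Python A raises KeyError: each branch needs the
-- inventory keys it actually reads ("ice" for item 1 only when "snow" is not positive).
def Pre_check_item_next (own : List (String × Int)) (item_number : Int) : Prop :=
  (item_number = 0 ∨ item_number > 3) ∨
  (item_number = 1 ∧ (PySem.Dict.mk own).contains "snow" = true ∧
    ((PySem.Dict.mk own).getD "snow" 0 ≤ 0 → (PySem.Dict.mk own).contains "ice" = true)) ∨
  (item_number = 2 ∧ (PySem.Dict.mk own).contains "ice" = true) ∨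
  (item_number ≠ 0 ∧ ¬ item_number > 3 ∧ item_number ≠ 1 ∧ item_number ≠ 2 ∧
    (PySem.Dict.mk own).contains "fish" = true)
instance (own : List (String × Int)) (item_number : Int) : Decidable (Pre_check_item_next own item_number) := by unfold Pre_check_item_next; infer_instance

def pvWitness_check_item_next : (List (String × Int)) × Int := ([("snow", 1)], 1)

def Spec_check_item_next (own : List (String × Int)) (item_number : Int) (out : Int) : Prop := out = check_item_next_alt own item_number
instance (own : List (String × Int)) (item_number : Int) (out : Int) : Decidable (Spec_check_item_next own item_number out) := by unfold Spec_check_item_next; infer_instance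

-- ===== CLAIM (what is proved, stated in full; the proofs are below) =====
def Claim_equal_check_item_next : Prop := ∀ (own : List (String × Int)) (item_number : Int), Dom_check_item_next own item_number → Pre_check_item_next own item_number → Spec_check_item_next own item_number (check_item_next own item_number)

-- ===== LEMMAS AND PROOFS =====

theorem pvChecks_one : pvChecks 1 = [("snow", 1), ("ice", 2)] := by decide

theorem pvChecks_two : pvChecks 2 = [("ice", 2)] := by decide

theorem pvChecks_other (n : Int) (h1 : n ≠ 1) (h2 : n ≠ 2) : pvChecks n = [("fish", 3)] := by
  simp [pvChecks, PySem.Dict.getD, h1.symm, h2.symm, PySem.Dict.get?]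

-- ===== VERDICT (by name: the statement is the Claim_ definition above) =====
theorem check_item_next_spec : Claim_equal_check_item_next := by
  intro own n _ _
  show check_item_next own n = check_item_next_alt own n
  rw [check_item_next]
  by_cases h0 : n = 0 ∨ n > 3
  · simp [check_item_next_alt, h0]
  · by_cases h1 : n = 1
    · subst h1
      rw [check_item_next]
      simp [check_item_next_alt, pvChecks_one, pvFirstCheck]
    · by_cases h2 : n = 2
      · subst h2
        simp [check_item_next_alt, pvChecks_two, pvFirstCheck]
      · simp [check_item_next_alt, h0, h1, h2, pvChecks_other n h1 h2, pvFirstCheck]
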